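-- pv_equiv track=rewrite | github.com/ytx/sound-pi | py/managers/audio.py | _match_node_block
-- ===== SOURCE A (Python) =====
-- def _match_node_block(lines: list[str], nick_pattern: str) -> str | None:
--     has_nick = False
--     node_name = None
--     for line in lines:
--         s = line.strip()
--         if "node.nick" in s and nick_pattern in s:
--             has_nick = True
--         if "node.name" in s and "=" in s:
--             node_name = s.split("=", 1)[1].strip().strip('"')
--     return node_name if has_nick else None
-- ===== SOURCE B (Python) =====
-- def _match_node_block(lines: list[str], nick_pattern: str) -> str | None:
--     stripped = [l.strip() for l in lines]
--     if not any("node.nick" in s and nick_pattern in s for s in stripped):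
--         return None
--     for s in reversed(stripped):
--         if "node.name" in s and "=" in s:
--             return s.split("=", 1)[1].strip().strip('"')
--     return None
-- ===== Notes on version B (the rewrite author's own statement) =====
-- stated objective: alternative
-- what changed: Replaces the single fused loop with two accumulators by two independent passes: an any() scan for the nick match and an early-returning scan over the reversed stripped lines for the last node.name assignment.
import Mathlib
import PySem

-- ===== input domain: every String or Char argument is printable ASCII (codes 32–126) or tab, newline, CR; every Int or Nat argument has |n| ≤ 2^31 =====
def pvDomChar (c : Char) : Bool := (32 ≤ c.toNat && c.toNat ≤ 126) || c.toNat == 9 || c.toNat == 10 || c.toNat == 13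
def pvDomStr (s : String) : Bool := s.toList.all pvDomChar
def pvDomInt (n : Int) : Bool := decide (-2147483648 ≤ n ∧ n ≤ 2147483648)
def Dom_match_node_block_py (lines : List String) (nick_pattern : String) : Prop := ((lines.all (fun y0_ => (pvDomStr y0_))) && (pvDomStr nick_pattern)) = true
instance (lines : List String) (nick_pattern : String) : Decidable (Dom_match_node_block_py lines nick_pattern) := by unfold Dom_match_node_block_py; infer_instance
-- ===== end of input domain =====

-- B replaces A's single fused loop (two accumulators) by two independent passes:
-- an any() scan for the nick match and an early-returning scan over the reversed
-- stripped lines for the last node.name assignment; alternative decomposition, same cost.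


-- ===== PORT A =====
-- s.split("=", 1)[1].strip().strip('"') ; the [1] index exists whenever "=" in s,
-- which is the only context A evaluates it in, so getD "" is never the default there.
def pvExtractA (s : String) : String :=
  PySem.Str.stripChars
    (PySem.Str.strip (((PySem.Str.splitMax? s "=" 1).getD []).getD 1 ""))
    "\""

def match_node_block_py (lines : List String) (nick_pattern : String) : Option String :=
  let st := lines.foldl (fun (acc : Bool × Option String) line =>
    let s := PySem.Str.strip line
    let hasNick := if PySem.Str.isIn "node.nick" s && PySem.Str.isIn nick_pattern s then true else acc.1
    let nodeName := if PySem.Str.isIn "node.name" s && PySem.Str.isIn "=" s then some (pvExtractA s) else acc.2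
    (hasNick, nodeName)) (false, none)
  if st.1 then st.2 else none

-- ===== PORT B =====
def pvExtractB (s : String) : String :=
  PySem.Str.stripChars
    (PySem.Str.strip (((PySem.Str.splitMax? s "=" 1).getD []).getD 1 ""))
    "\""

-- the early-returning `for s in reversed(stripped)` loop: first match wins
def pvFindNameB : List String → Option String
  | [] => none
  | s :: rest =>
    if PySem.Str.isIn "node.name" s && PySem.Str.isIn "=" s then some (pvExtractB s)
    else pvFindNameB rest

def match_node_block_py_alt (lines : List String) (nick_pattern : String) : Option String :=
  let stripped := lines.map PySem.Str.strip
  if !(stripped.any (fun s => PySem.Str.isIn "node.nick" s && PySem.Str.isIn nick_pattern s)) then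
    none
  else
    pvFindNameB stripped.reverse

-- ===== PRECONDITION & SPEC =====
def Spec_match_node_block_py (lines : List String) (nick_pattern : String) (out : Option String) : Prop := out = match_node_block_py_alt lines nick_pattern
instance (lines : List String) (nick_pattern : String) (out : Option String) : Decidable (Spec_match_node_block_py lines nick_pattern out) := by unfold Spec_match_node_block_py; infer_instance

-- ===== CLAIM (what is proved, stated in full; the proofs are below) =====
def Claim_equal_match_node_block_py : Prop := ∀ (lines : List String) (nick_pattern : String), Dom_match_node_block_py lines nick_pattern → Spec_match_node_block_py lines nick_pattern (match_node_block_py lines nick_pattern)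

-- ===== LEMMAS AND PROOFS =====

theorem pvFindNameB_append (xs ys : List String) :
    pvFindNameB (xs ++ ys) = (pvFindNameB xs).or (pvFindNameB ys) := by
  induction xs with
  | nil => simp [pvFindNameB]
  | cons s rest ih =>
    simp only [List.cons_append, pvFindNameB]
    split <;> simp [ih]

theorem pv_fold_spec (np : String) (lines : List String) (b : Bool) (o : Option String) :
    lines.foldl (fun (acc : Bool × Option String) line =>
      let s := PySem.Str.strip line
      let hasNick := if PySem.Str.isIn "node.nick" s && PySem.Str.isIn np s then true else acc.1
      let nodeName := if PySem.Str.isIn "node.name" s && PySem.Str.isIn "=" s then some (pvExtractA s) else acc.2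
      (hasNick, nodeName)) (b, o)
    = (b || (lines.map PySem.Str.strip).any (fun s => PySem.Str.isIn "node.nick" s && PySem.Str.isIn np s),
       (pvFindNameB (lines.map PySem.Str.strip).reverse).or o) := by
  induction lines generalizing b o with
  | nil => simp [pvFindNameB]
  | cons l rest ih =>
    simp only [List.foldl_cons, List.map_cons, List.any_cons, List.reverse_cons,
      pvFindNameB_append, ih, Prod.mk.injEq]
    refine ⟨?_, ?_⟩
    · cases h : PySem.Str.isIn "node.nick" (PySem.Str.strip l) && PySem.Str.isIn np (PySem.Str.strip l) <;>
        simp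
    · rw [Option.or_assoc]
      congr 1
      simp only [pvFindNameB]
      split <;> simp [pvExtractB, pvExtractA]

-- ===== VERDICT (by name: the statement is the Claim_ definition above) =====
theorem match_node_block_py_spec : Claim_equal_match_node_block_py := by
  intro lines np _
  unfold Spec_match_node_block_py match_node_block_py match_node_block_py_alt
  simp only [pv_fold_spec, Bool.false_or, Option.or_none]
  cases h : (lines.map PySem.Str.strip).any (fun s => PySem.Str.isIn "node.nick" s && PySem.Str.isIn np s) <;>
    simp
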